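-- pv_equiv track=rewrite | github.com/binref/refinery | refinery/lib/crypto/twofish.py | _rs_mds_encode
-- ===== SOURCE A (Python) =====
-- def _gf_mult(a: int, b: int, p: int) -> int:
--     """
--     Multiply two elements in GF(2^8) with the given modular polynomial.
--     """
--     result = 0
--     a &= 0xFF
--     for _ in range(8):
--         if b & 1:
--             result ^= a
--         b >>= 1
--         carry = a & 0x80
--         a = (a << 1) & 0xFF
--         if carry:
--             a ^= p & 0xFF
--     return result
--
-- _RS_POLY = 0x14D
--
-- _RS_MATRIX = [
--     [0x01, 0xA4, 0x55, 0x87, 0x5A, 0x58, 0xDB, 0x9E],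
--     [0xA4, 0x56, 0x82, 0xF3, 0x1E, 0xC6, 0x68, 0xE5],
--     [0x02, 0xA1, 0xFC, 0xC1, 0x47, 0xAE, 0x3D, 0x19],
--     [0xA4, 0x55, 0x87, 0x5A, 0x58, 0xDB, 0x9E, 0x03],
-- ]
--
-- def _rs_mds_encode(k0: int, k1: int) -> int:
--     """
--     Use the Reed-Solomon [8,4] code over GF(2^8) / 0x14D to compute one 32-bit S-box key word from
--     two 32-bit key halves (8 key bytes total). Here, `k0` and `k1` are little-endian 32-bit words.
--     """
--     # Extract 8 input bytes in little-endian order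
--     inp = []
--     for v in (k0, k1):
--         for shift in range(0, 32, 8):
--             inp.append((v >> shift) & 0xFF)
--
--     result = 0
--     for row in range(4):
--         val = 0
--         for col in range(8):
--             val ^= _gf_mult(_RS_MATRIX[row][col], inp[col], _RS_POLY)
--         result |= val << (row * 8)
--     return result
-- ===== SOURCE B (Python) =====
-- _RS_GF_FDBK = 0x14D
--
-- def _rs_rem(x: int) -> int:
--     # One step of the GF(2^8)/0x14D shift-register remainder (Twofish reference RS_rem).
--     b = (x >> 24) & 0xFF
--     g2 = ((b << 1) ^ (_RS_GF_FDBK if b & 0x80 else 0)) & 0xFF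
--     g3 = ((b >> 1) ^ ((_RS_GF_FDBK >> 1) if b & 1 else 0)) ^ g2
--     return ((x << 8) ^ (g3 << 24) ^ (g2 << 16) ^ (g3 << 8) ^ b) & 0xFFFFFFFF
--
-- def _rs_mds_encode(k0: int, k1: int) -> int:
--     r = k1 & 0xFFFFFFFF
--     for _ in range(4):
--         r = _rs_rem(r)
--     r ^= k0 & 0xFFFFFFFF
--     for _ in range(4):
--         r = _rs_rem(r)
--     return r
-- ===== Notes on version B (the rewrite author's own statement) =====
-- stated objective: alternative
-- what changed: Replaces the 4x8 GF(2^8) matrix multiply (32 shift-and-add field multiplications against fixed coefficients) with the reference Twofish RS computation: the two 32-bit halves are fed through a GF(2^8)/0x14D shift-register polynomial-remainder loop (4 reduction steps per word), which produces the same four remainder bytes.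
import Mathlib
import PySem

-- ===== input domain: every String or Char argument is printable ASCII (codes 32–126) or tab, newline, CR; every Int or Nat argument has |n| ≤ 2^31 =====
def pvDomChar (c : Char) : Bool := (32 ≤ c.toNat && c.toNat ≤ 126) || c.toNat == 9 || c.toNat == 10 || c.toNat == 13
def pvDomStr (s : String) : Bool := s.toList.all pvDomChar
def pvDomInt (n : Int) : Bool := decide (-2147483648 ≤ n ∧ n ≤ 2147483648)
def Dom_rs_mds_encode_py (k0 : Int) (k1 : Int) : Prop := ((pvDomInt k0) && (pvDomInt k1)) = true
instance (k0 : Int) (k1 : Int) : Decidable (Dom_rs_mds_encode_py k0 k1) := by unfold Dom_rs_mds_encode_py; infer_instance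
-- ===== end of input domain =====

-- B replaces A's 4×8 GF(2^8) matrix multiply with the reference Twofish RS shift-register
-- polynomial remainder (alternative algorithm, similar cost; return value only, no mutation).

-- ===== PORT A =====
-- Python `(v >> shift) & 0xFF` is ported as ((v >>> shift) % 256).toNat — exact for every
-- Python int (`>>` floors, also on negatives, exactly like Lean's Int `>>>`; `& 0xFF` with a
-- nonnegative mask is Python's floor-mod 256, which is Lean's Int `%` = Int.emod).  After this
-- extraction every value in A is a nonnegative int, so the body is ported over Nat, whose
-- &&& ^^^ ||| <<< >>> agree with Python's on nonnegative ints.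
def pvByte (v : Int) (s : Nat) : Nat := ((v >>> s) % 256).toNat

-- one iteration of the `for _ in range(8)` loop of _gf_mult, state (result, a, b)
def pvGfStep (p : Nat) (s : Nat × Nat × Nat) : Nat × Nat × Nat :=
  let result := if s.2.2 &&& 1 ≠ 0 then s.1 ^^^ s.2.1 else s.1
  let b := s.2.2 >>> 1
  let carry := s.2.1 &&& 0x80
  let a := (s.2.1 <<< 1) &&& 0xFF
  let a := if carry ≠ 0 then a ^^^ (p &&& 0xFF) else a
  (result, a, b)

-- _gf_mult(a, b, p)
def pvGfMult (a b p : Nat) : Nat :=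
  ((List.range 8).foldl (fun s _ => pvGfStep p s) (0, a &&& 0xFF, b)).1

def pvRsMatrix : List (List Nat) :=
  [[0x01, 0xA4, 0x55, 0x87, 0x5A, 0x58, 0xDB, 0x9E],
   [0xA4, 0x56, 0x82, 0xF3, 0x1E, 0xC6, 0x68, 0xE5],
   [0x02, 0xA1, 0xFC, 0xC1, 0x47, 0xAE, 0x3D, 0x19],
   [0xA4, 0x55, 0x87, 0x5A, 0x58, 0xDB, 0x9E, 0x03]]

-- the 8 input bytes, little-endian, k0 first (the two nested `for` loops building `inp`)
def pvInp (k0 k1 : Int) : List Nat :=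
  [k0, k1].flatMap (fun v => [0, 8, 16, 24].map (fun s => pvByte v s))

-- the two nested result loops of _rs_mds_encode
def pvARaw (inp : List Nat) : Nat :=
  (List.range 4).foldl (fun result row =>
      result ||| ((List.range 8).foldl (fun val col =>
        val ^^^ pvGfMult ((pvRsMatrix.getD row []).getD col 0) (inp.getD col 0) 0x14D) 0)
        <<< (row * 8)) 0

def rs_mds_encode_py (k0 : Int) (k1 : Int) : Int :=
  (pvARaw (pvInp k0 k1) : Nat)

-- ===== PORT B =====
-- Python `k & 0xFFFFFFFF` is ported as (k % 4294967296).toNat — exact for every Python int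
-- (& with a nonnegative mask 2^32-1 is floor-mod 2^32); the rest of B runs on nonnegative
-- ints and is ported over Nat as above.
def pvRsRem (x : Nat) : Nat :=
  let b := (x >>> 24) &&& 0xFF
  let g2 := ((b <<< 1) ^^^ (if b &&& 0x80 ≠ 0 then 0x14D else 0)) &&& 0xFF
  let g3 := ((b >>> 1) ^^^ (if b &&& 1 ≠ 0 then 0x14D >>> 1 else 0)) ^^^ g2
  ((x <<< 8) ^^^ (g3 <<< 24) ^^^ (g2 <<< 16) ^^^ (g3 <<< 8) ^^^ b) &&& 0xFFFFFFFF

def rs_mds_encode_py_alt (k0 : Int) (k1 : Int) : Int :=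
  let r := (k1 % 4294967296).toNat
  let r := (List.range 4).foldl (fun r _ => pvRsRem r) r
  let r := r ^^^ (k0 % 4294967296).toNat
  ((List.range 4).foldl (fun r _ => pvRsRem r) r : Nat)

-- ===== PRECONDITION & SPEC =====
def Spec_rs_mds_encode_py (k0 : Int) (k1 : Int) (out : Int) : Prop := out = rs_mds_encode_py_alt k0 k1
instance (k0 : Int) (k1 : Int) (out : Int) : Decidable (Spec_rs_mds_encode_py k0 k1 out) := by unfold Spec_rs_mds_encode_py; infer_instance

-- ===== CLAIM (what is proved, stated in full; the proofs are below) =====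
def Claim_equal_rs_mds_encode_py : Prop := ∀ (k0 : Int) (k1 : Int), Dom_rs_mds_encode_py k0 k1 → Spec_rs_mds_encode_py k0 k1 (rs_mds_encode_py k0 k1)

-- ===== LEMMAS AND PROOFS =====

-- the byte-feed part of pvRsRem: the top byte's contribution to the new register
def pvT (b : Nat) : Nat :=
  let g2 := ((b <<< 1) ^^^ (if b &&& 0x80 ≠ 0 then 0x14D else 0)) &&& 0xFF
  let g3 := ((b >>> 1) ^^^ (if b &&& 1 ≠ 0 then 0x14D >>> 1 else 0)) ^^^ g2
  (g3 <<< 24) ^^^ (g2 <<< 16) ^^^ (g3 <<< 8) ^^^ b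

-- column c's total contribution to A's result for input byte v
def pvCol (c v : Nat) : Nat :=
  (List.range 4).foldl (fun acc r => acc ^^^ (pvGfMult ((pvRsMatrix.getD r []).getD c 0) v 0x14D) <<< (r * 8)) 0

def pvR4 (x : Nat) : Nat := pvRsRem (pvRsRem (pvRsRem (pvRsRem x)))

-- pvT is GF(2)-linear on bytes (kernel enumeration)
set_option maxRecDepth 200000 in
set_option maxHeartbeats 1000000 in
theorem pvT_lin : ∀ b < 256, ∀ c < 256, pvT (b ^^^ c) = pvT b ^^^ pvT c := by decide

-- A's eight column contributions agree with B's shift register on single-byte words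
set_option maxRecDepth 200000 in
set_option maxHeartbeats 4000000 in
theorem pvCol0 : ∀ v < 256, pvCol 0 v = pvR4 (v) := by decide

set_option maxRecDepth 200000 in
set_option maxHeartbeats 4000000 in
theorem pvCol1 : ∀ v < 256, pvCol 1 v = pvR4 (v <<< 8) := by decide

set_option maxRecDepth 200000 in
set_option maxHeartbeats 4000000 in
theorem pvCol2 : ∀ v < 256, pvCol 2 v = pvR4 (v <<< 16) := by decide

set_option maxRecDepth 200000 in
set_option maxHeartbeats 4000000 in
theorem pvCol3 : ∀ v < 256, pvCol 3 v = pvR4 (v <<< 24) := by decide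

set_option maxRecDepth 200000 in
set_option maxHeartbeats 4000000 in
theorem pvCol4 : ∀ v < 256, pvCol 4 v = pvR4 (pvR4 (v)) := by decide

set_option maxRecDepth 200000 in
set_option maxHeartbeats 4000000 in
theorem pvCol5 : ∀ v < 256, pvCol 5 v = pvR4 (pvR4 (v <<< 8)) := by decide

set_option maxRecDepth 200000 in
set_option maxHeartbeats 4000000 in
theorem pvCol6 : ∀ v < 256, pvCol 6 v = pvR4 (pvR4 (v <<< 16)) := by decide

set_option maxRecDepth 200000 in
set_option maxHeartbeats 4000000 in
theorem pvCol7 : ∀ v < 256, pvCol 7 v = pvR4 (pvR4 (v <<< 24)) := by decide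

-- splitting a 32-bit word into its 4 bytes, as a xor
theorem pvDecomp32 (n : Nat) (h : n < 2^32) :
    n = (n >>> 0 &&& 255) ^^^ ((n >>> 8 &&& 255) <<< 8) ^^^ ((n >>> 16 &&& 255) <<< 16) ^^^ ((n >>> 24 &&& 255) <<< 24) := by
  apply Nat.eq_of_testBit_eq; intro i
  simp [Nat.testBit_xor, Nat.testBit_shiftLeft, Nat.testBit_and, Nat.testBit_shiftRight]
  by_cases h32 : i < 32
  · interval_cases i <;>
      (simp only [Nat.reduceAdd, Nat.reduceSub, Nat.reduceLeDiff, decide_true, decide_false,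
                  Bool.false_and, Bool.true_and]
       generalize n.testBit _ = b
       revert b
       decide)
  · have hf : n.testBit i = false := Nat.testBit_eq_false_of_lt (lt_of_lt_of_le h (Nat.pow_le_pow_right (by norm_num) (by omega)))
    have e1 : 8 + (i - 8) = i := by omega
    have e2 : 16 + (i - 16) = i := by omega
    have e3 : 24 + (i - 24) = i := by omega
    simp [e1, e2, e3, hf]

-- pvRsRem is one masked shift xor a byte-table feed
theorem pvRsRem_split (z : Nat) :
    pvRsRem z = ((z <<< 8) &&& 0xFFFFFFFF) ^^^ (pvT ((z >>> 24) &&& 0xFF) &&& 0xFFFFFFFF) := by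
  simp only [pvRsRem, pvT]
  simp only [Nat.and_xor_distrib_right]
  ac_rfl

-- the shift register is GF(2)-linear
theorem pvRsRem_lin (x y : Nat) : pvRsRem (x ^^^ y) = pvRsRem x ^^^ pvRsRem y := by
  have hx : (x >>> 24) &&& 0xFF < 256 := by
    have : (x >>> 24) &&& 0xFF ≤ 0xFF := Nat.and_le_right; omega
  have hy : (y >>> 24) &&& 0xFF < 256 := by
    have : (y >>> 24) &&& 0xFF ≤ 0xFF := Nat.and_le_right; omega
  rw [pvRsRem_split, pvRsRem_split, pvRsRem_split]
  rw [Nat.shiftRight_xor_distrib, Nat.and_xor_distrib_right, pvT_lin _ hx _ hy,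
      Nat.shiftLeft_xor_distrib, Nat.and_xor_distrib_right, Nat.and_xor_distrib_right]
  ac_rfl

theorem pvR4_lin (x y : Nat) : pvR4 (x ^^^ y) = pvR4 x ^^^ pvR4 y := by
  simp [pvR4, pvRsRem_lin]

-- gf_mult's loop state stays below 256
theorem pvGfLoop_lt (l : List Nat) (p : Nat) : ∀ s : Nat × Nat × Nat, s.1 < 256 → s.2.1 < 256 →
    (l.foldl (fun s _ => pvGfStep p s) s).1 < 256 := by
  induction l with
  | nil => intro s h1 h2; simpa using h1
  | cons x xs ih =>
    intro s h1 h2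
    apply ih
    · simp only [pvGfStep]
      split_ifs
      · have : s.1 ^^^ s.2.1 < 2^8 := Nat.xor_lt_two_pow (by omega) (by omega)
        omega
      · exact h1
    · simp only [pvGfStep]
      have hm : (s.2.1 <<< 1) &&& 0xFF ≤ 0xFF := Nat.and_le_right
      have hp : p &&& 0xFF ≤ 0xFF := Nat.and_le_right
      split_ifs
      · have : ((s.2.1 <<< 1) &&& 0xFF) ^^^ (p &&& 0xFF) < 2^8 := Nat.xor_lt_two_pow (by omega) (by omega)
        omega
      · omega

theorem pvGfMult_lt (a b p : Nat) : pvGfMult a b p < 256 := by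
  apply pvGfLoop_lt
  · show (0:Nat) < 256; omega
  · show a &&& 0xFF < 256
    have : a &&& 0xFF ≤ 0xFF := Nat.and_le_right; omega

theorem xor2lt {a b : Nat} (ha : a < 256) (hb : b < 256) : a ^^^ b < 256 := by
  have : a ^^^ b < 2^8 := Nat.xor_lt_two_pow (by omega) (by omega); omega

theorem or_shift_eq_xor (a b m : Nat) (ha : a < 2^m) : a ||| (b <<< m) = a ^^^ (b <<< m) := by
  apply Nat.eq_of_testBit_eq; intro i
  by_cases h : i < m
  · have hb : (b <<< m).testBit i = false := by
      simp [Nat.testBit_shiftLeft]; omega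
    simp [Nat.testBit_or, Nat.testBit_xor, hb]
  · have hf : a.testBit i = false := Nat.testBit_eq_false_of_lt (lt_of_lt_of_le ha (Nat.pow_le_pow_right (by norm_num) (by omega)))
    simp [Nat.testBit_or, Nat.testBit_xor, hf]

theorem xor_shift_lt (a b m : Nat) (ha : a < 2^m) (hb : b < 256) : a ^^^ (b <<< m) < 2^(m+8) := by
  apply Nat.xor_lt_two_pow
  · exact lt_of_lt_of_le ha (Nat.pow_le_pow_right (by norm_num) (by omega))
  · rw [Nat.shiftLeft_eq, pow_add]
    calc b * 2^m < 256 * 2^m := by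
          have h2 : 0 < 2^m := Nat.two_pow_pos m
          exact Nat.mul_lt_mul_of_lt_of_le hb (le_refl _) h2
      _ = 2^m * 2^8 := by ring

theorem orChain (v0 v1 v2 v3 : Nat) (h0 : v0 < 256) (h1 : v1 < 256) (h2 : v2 < 256) (h3 : v3 < 256) :
    ((v0 ||| v1 <<< 8) ||| v2 <<< 16) ||| v3 <<< 24 = ((v0 ^^^ v1 <<< 8) ^^^ v2 <<< 16) ^^^ v3 <<< 24 := by
  have e1 : v0 ||| v1 <<< 8 = v0 ^^^ v1 <<< 8 := or_shift_eq_xor v0 v1 8 (by omega)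
  have l1 : v0 ^^^ v1 <<< 8 < 2^16 := by
    have := xor_shift_lt v0 v1 8 (by omega) h1; simpa using this
  have e2 : (v0 ^^^ v1 <<< 8) ||| v2 <<< 16 = (v0 ^^^ v1 <<< 8) ^^^ v2 <<< 16 :=
    or_shift_eq_xor _ v2 16 l1
  have l2 : (v0 ^^^ v1 <<< 8) ^^^ v2 <<< 16 < 2^24 := by
    have := xor_shift_lt _ v2 16 l1 h2; simpa using this
  have e3 : ((v0 ^^^ v1 <<< 8) ^^^ v2 <<< 16) ||| v3 <<< 24 = ((v0 ^^^ v1 <<< 8) ^^^ v2 <<< 16) ^^^ v3 <<< 24 :=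
    or_shift_eq_xor _ v3 24 l2
  rw [e1, e2, e3]

-- A's two result loops, regrouped by input byte
set_option maxHeartbeats 1600000 in
theorem pvARaw_cols (b0 b1 b2 b3 b4 b5 b6 b7 : Nat) :
    pvARaw [b0, b1, b2, b3, b4, b5, b6, b7] =
      pvCol 0 b0 ^^^ pvCol 1 b1 ^^^ pvCol 2 b2 ^^^ pvCol 3 b3 ^^^
      pvCol 4 b4 ^^^ pvCol 5 b5 ^^^ pvCol 6 b6 ^^^ pvCol 7 b7 := by
  show ((((0 ||| ((((((((0 ^^^ pvGfMult 1 b0 333) ^^^ pvGfMult 164 b1 333) ^^^ pvGfMult 85 b2 333) ^^^ pvGfMult 135 b3 333) ^^^ pvGfMult 90 b4 333) ^^^ pvGfMult 88 b5 333) ^^^ pvGfMult 219 b6 333) ^^^ pvGfMult 158 b7 333) <<< (0 * 8)) ||| ((((((((0 ^^^ pvGfMult 164 b0 333) ^^^ pvGfMult 86 b1 333) ^^^ pvGfMult 130 b2 333) ^^^ pvGfMult 243 b3 333) ^^^ pvGfMult 30 b4 333) ^^^ pvGfMult 198 b5 333) ^^^ pvGfMult 104 b6 333) ^^^ pvGfMult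 229 b7 333) <<< (1 * 8)) ||| ((((((((0 ^^^ pvGfMult 2 b0 333) ^^^ pvGfMult 161 b1 333) ^^^ pvGfMult 252 b2 333) ^^^ pvGfMult 193 b3 333) ^^^ pvGfMult 71 b4 333) ^^^ pvGfMult 174 b5 333) ^^^ pvGfMult 61 b6 333) ^^^ pvGfMult 25 b7 333) <<< (2 * 8)) ||| ((((((((0 ^^^ pvGfMult 164 b0 333) ^^^ pvGfMult 85 b1 333) ^^^ pvGfMult 135 b2 333) ^^^ pvGfMult 90 b3 333) ^^^ pvGfMult 88 b4 333) ^^^ pvGfMult 219 b5 333) ^^^ pvGfMult 158 b6 333) ^^^ pvGfMult 3 b7 333) <<< (3 * 8)) = (((((0 ^^^ (pvGfMult 1 b0 333) <<< (0 * 8)) ^^^ (pvGfMult 164 b0 333) <<< (1 * 8)) ^^^ (pvGfMult 2 b0 333) <<< (2 * 8)) ^^^ (pvGfMult 164 b0 333) <<< (3 * 8))) ^^^ (((((0 ^^^ (pvGfMult 164 b1 333) <<< (0 * 8)) ^^^ (pvGfMult 86 b1 333) <<< (1 * 8)) ^^^ (pvGfMult 161 b1 333) <<< (2 * 8)) ^^^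 (pvGfMult 85 b1 333) <<< (3 * 8))) ^^^ (((((0 ^^^ (pvGfMult 85 b2 333) <<< (0 * 8)) ^^^ (pvGfMult 130 b2 333) <<< (1 * 8)) ^^^ (pvGfMult 252 b2 333) <<< (2 * 8)) ^^^ (pvGfMult 135 b2 333) <<< (3 * 8))) ^^^ (((((0 ^^^ (pvGfMult 135 b3 333) <<< (0 * 8)) ^^^ (pvGfMult 243 b3 333) <<< (1 * 8)) ^^^ (pvGfMult 193 b3 333) <<< (2 * 8)) ^^^ (pvGfMult 90 b3 333) <<< (3 * 8))) ^^^ (((((0 ^^^ (pvGfMult 90 b4 333) <<< (0 * 8)) ^^^ (pvGfMult 30 b4 333) <<< (1 * 8)) ^^^ (pvGfMult 71 b4 333) <<< (2 * 8)) ^^^ (pvGfMult 88 b4 333) <<< (3 * 8))) ^^^ (((((0 ^^^ (pvGfMult 88 b5 333) <<< (0 * 8)) ^^^ (pvGfMult 198 b5 333) <<< (1 * 8)) ^^^ (pvGfMult 174 b5 333) <<< (2 * 8)) ^^^ (pvGfMult 219 b5 333) <<< (3 * 8))) ^^^ (((((0 ^^^ (pvGfMult 219 b6 333) <<< (0 *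 8)) ^^^ (pvGfMult 104 b6 333) <<< (1 * 8)) ^^^ (pvGfMult 61 b6 333) <<< (2 * 8)) ^^^ (pvGfMult 158 b6 333) <<< (3 * 8))) ^^^ (((((0 ^^^ (pvGfMult 158 b7 333) <<< (0 * 8)) ^^^ (pvGfMult 229 b7 333) <<< (1 * 8)) ^^^ (pvGfMult 25 b7 333) <<< (2 * 8)) ^^^ (pvGfMult 3 b7 333) <<< (3 * 8)))
  generalize ht1x0 : pvGfMult 1 b0 333 = t1x0
  have lt1x0 : t1x0 < 256 := by rw [← ht1x0]; exact pvGfMult_lt _ _ _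
  generalize ht164x1 : pvGfMult 164 b1 333 = t164x1
  have lt164x1 : t164x1 < 256 := by rw [← ht164x1]; exact pvGfMult_lt _ _ _
  generalize ht85x2 : pvGfMult 85 b2 333 = t85x2
  have lt85x2 : t85x2 < 256 := by rw [← ht85x2]; exact pvGfMult_lt _ _ _
  generalize ht135x3 : pvGfMult 135 b3 333 = t135x3
  have lt135x3 : t135x3 < 256 := by rw [← ht135x3]; exact pvGfMult_lt _ _ _
  generalize ht90x4 : pvGfMult 90 b4 333 = t90x4
  have lt90x4 : t90x4 < 256 := by rw [← ht90x4]; exact pvGfMult_lt _ _ _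
  generalize ht88x5 : pvGfMult 88 b5 333 = t88x5
  have lt88x5 : t88x5 < 256 := by rw [← ht88x5]; exact pvGfMult_lt _ _ _
  generalize ht219x6 : pvGfMult 219 b6 333 = t219x6
  have lt219x6 : t219x6 < 256 := by rw [← ht219x6]; exact pvGfMult_lt _ _ _
  generalize ht158x7 : pvGfMult 158 b7 333 = t158x7
  have lt158x7 : t158x7 < 256 := by rw [← ht158x7]; exact pvGfMult_lt _ _ _
  generalize ht164x0 : pvGfMult 164 b0 333 = t164x0
  have lt164x0 : t164x0 < 256 := by rw [← ht164x0]; exact pvGfMult_lt _ _ _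
  generalize ht86x1 : pvGfMult 86 b1 333 = t86x1
  have lt86x1 : t86x1 < 256 := by rw [← ht86x1]; exact pvGfMult_lt _ _ _
  generalize ht130x2 : pvGfMult 130 b2 333 = t130x2
  have lt130x2 : t130x2 < 256 := by rw [← ht130x2]; exact pvGfMult_lt _ _ _
  generalize ht243x3 : pvGfMult 243 b3 333 = t243x3
  have lt243x3 : t243x3 < 256 := by rw [← ht243x3]; exact pvGfMult_lt _ _ _
  generalize ht30x4 : pvGfMult 30 b4 333 = t30x4
  have lt30x4 : t30x4 < 256 := by rw [← ht30x4]; exact pvGfMult_lt _ _ _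
  generalize ht198x5 : pvGfMult 198 b5 333 = t198x5
  have lt198x5 : t198x5 < 256 := by rw [← ht198x5]; exact pvGfMult_lt _ _ _
  generalize ht104x6 : pvGfMult 104 b6 333 = t104x6
  have lt104x6 : t104x6 < 256 := by rw [← ht104x6]; exact pvGfMult_lt _ _ _
  generalize ht229x7 : pvGfMult 229 b7 333 = t229x7
  have lt229x7 : t229x7 < 256 := by rw [← ht229x7]; exact pvGfMult_lt _ _ _
  generalize ht2x0 : pvGfMult 2 b0 333 = t2x0
  have lt2x0 : t2x0 < 256 := by rw [← ht2x0]; exact pvGfMult_lt _ _ _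
  generalize ht161x1 : pvGfMult 161 b1 333 = t161x1
  have lt161x1 : t161x1 < 256 := by rw [← ht161x1]; exact pvGfMult_lt _ _ _
  generalize ht252x2 : pvGfMult 252 b2 333 = t252x2
  have lt252x2 : t252x2 < 256 := by rw [← ht252x2]; exact pvGfMult_lt _ _ _
  generalize ht193x3 : pvGfMult 193 b3 333 = t193x3
  have lt193x3 : t193x3 < 256 := by rw [← ht193x3]; exact pvGfMult_lt _ _ _
  generalize ht71x4 : pvGfMult 71 b4 333 = t71x4
  have lt71x4 : t71x4 < 256 := by rw [← ht71x4]; exact pvGfMult_lt _ _ _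
  generalize ht174x5 : pvGfMult 174 b5 333 = t174x5
  have lt174x5 : t174x5 < 256 := by rw [← ht174x5]; exact pvGfMult_lt _ _ _
  generalize ht61x6 : pvGfMult 61 b6 333 = t61x6
  have lt61x6 : t61x6 < 256 := by rw [← ht61x6]; exact pvGfMult_lt _ _ _
  generalize ht25x7 : pvGfMult 25 b7 333 = t25x7
  have lt25x7 : t25x7 < 256 := by rw [← ht25x7]; exact pvGfMult_lt _ _ _
  generalize ht85x1 : pvGfMult 85 b1 333 = t85x1
  have lt85x1 : t85x1 < 256 := by rw [← ht85x1]; exact pvGfMult_lt _ _ _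
  generalize ht135x2 : pvGfMult 135 b2 333 = t135x2
  have lt135x2 : t135x2 < 256 := by rw [← ht135x2]; exact pvGfMult_lt _ _ _
  generalize ht90x3 : pvGfMult 90 b3 333 = t90x3
  have lt90x3 : t90x3 < 256 := by rw [← ht90x3]; exact pvGfMult_lt _ _ _
  generalize ht88x4 : pvGfMult 88 b4 333 = t88x4
  have lt88x4 : t88x4 < 256 := by rw [← ht88x4]; exact pvGfMult_lt _ _ _
  generalize ht219x5 : pvGfMult 219 b5 333 = t219x5
  have lt219x5 : t219x5 < 256 := by rw [← ht219x5]; exact pvGfMult_lt _ _ _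
  generalize ht158x6 : pvGfMult 158 b6 333 = t158x6
  have lt158x6 : t158x6 < 256 := by rw [← ht158x6]; exact pvGfMult_lt _ _ _
  generalize ht3x7 : pvGfMult 3 b7 333 = t3x7
  have lt3x7 : t3x7 < 256 := by rw [← ht3x7]; exact pvGfMult_lt _ _ _
  simp only [Nat.reduceMul, Nat.zero_or, Nat.zero_xor, Nat.shiftLeft_zero]
  rw [orChain _ _ _ _ (xor2lt (xor2lt (xor2lt (xor2lt (xor2lt (xor2lt (xor2lt lt1x0 lt164x1) lt85x2) lt135x3) lt90x4) lt88x5) lt219x6) lt158x7) (xor2lt (xor2lt (xor2lt (xor2lt (xor2lt (xor2lt (xor2lt lt164x0 lt86x1) lt130x2) lt243x3) lt30x4) lt198x5) lt104x6) lt229x7) (xor2lt (xor2lt (xor2lt (xor2lt (xor2lt (xor2lt (xor2lt lt2x0 lt161x1) lt252x2) lt193x3) lt71x4) lt174x5) lt61x6) lt25x7) (xor2lt (xor2lt (xor2lt (xor2lt (xor2lt (xor2lt (xor2lt lt164x0 lt85x1) lt135x2) lt90x3) lt88x4) lt219x5) lt158x6) lt3x7)]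
  simp only [Nat.shiftLeft_xor_distrib]
  simp only [Nat.xor_assoc]
  simp [Nat.xor_comm, Nat.xor_left_comm]

theorem pvR4_byte_split (n : Nat) (h : n < 2^32) :
    pvR4 n = ((pvR4 (n >>> 0 &&& 255) ^^^ pvR4 ((n >>> 8 &&& 255) <<< 8)) ^^^ pvR4 ((n >>> 16 &&& 255) <<< 16)) ^^^ pvR4 ((n >>> 24 &&& 255) <<< 24) := by
  conv_lhs => rw [pvDecomp32 n h]
  rw [pvR4_lin, pvR4_lin, pvR4_lin]

theorem pvR8_byte_split (n : Nat) (h : n < 2^32) :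
    pvR4 (pvR4 n) = ((pvR4 (pvR4 (n >>> 0 &&& 255)) ^^^ pvR4 (pvR4 ((n >>> 8 &&& 255) <<< 8))) ^^^ pvR4 (pvR4 ((n >>> 16 &&& 255) <<< 16))) ^^^ pvR4 (pvR4 ((n >>> 24 &&& 255) <<< 24)) := by
  conv_lhs => rw [pvR4_byte_split n h]
  rw [pvR4_lin, pvR4_lin, pvR4_lin]

theorem pvNatMain (n0 n1 : Nat) (h0 : n0 < 2^32) (h1 : n1 < 2^32) :
    pvR4 (pvR4 n1 ^^^ n0) =
      pvCol 0 (n0 >>> 0 &&& 255) ^^^ pvCol 1 (n0 >>> 8 &&& 255) ^^^ pvCol 2 (n0 >>> 16 &&& 255) ^^^ pvCol 3 (n0 >>> 24 &&& 255) ^^^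
      pvCol 4 (n1 >>> 0 &&& 255) ^^^ pvCol 5 (n1 >>> 8 &&& 255) ^^^ pvCol 6 (n1 >>> 16 &&& 255) ^^^ pvCol 7 (n1 >>> 24 &&& 255) := by
  have hb : ∀ m s : Nat, m >>> s &&& 255 < 256 := by
    intro m s; have : m >>> s &&& 255 ≤ 255 := Nat.and_le_right; omega
  rw [pvR4_lin, pvR4_byte_split n0 h0, pvR8_byte_split n1 h1]
  rw [← pvCol0 _ (hb n0 0), ← pvCol1 _ (hb n0 8), ← pvCol2 _ (hb n0 16), ← pvCol3 _ (hb n0 24),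
      ← pvCol4 _ (hb n1 0), ← pvCol5 _ (hb n1 8), ← pvCol6 _ (hb n1 16), ← pvCol7 _ (hb n1 24)]
  simp only [Nat.xor_assoc]
  simp [Nat.xor_comm, Nat.xor_left_comm]

-- exact byte extraction: A's (k >> s) & 0xFF equals byte s/8 of B's k & 0xFFFFFFFF
theorem pvByteCore0 (m t : Int) (h0 : 0 ≤ m) (h1 : m < 4294967296) :
    ((m + 4294967296 * t) % 256).toNat = m.toNat % 256 := by
  have e2 : (m + 4294967296 * t) % 256 = m % 256 := by
    have h : m + 4294967296 * t = m + 256 * (16777216 * t) := by ring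
    rw [h, Int.add_mul_emod_self_left]
  rw [e2]
  omega

theorem pvByteCore8 (m t : Int) (h0 : 0 ≤ m) (h1 : m < 4294967296) :
    (((m + 4294967296 * t) / 256) % 256).toNat = (m.toNat / 256) % 256 := by
  have e1 : (m + 4294967296 * t) / 256 = m / 256 + 16777216 * t := by
    have h : m + 4294967296 * t = m + (16777216 * t) * 256 := by ring
    rw [h, Int.add_mul_ediv_right _ _ (by norm_num : (256:Int) ≠ 0)]
  have e2 : (m / 256 + 16777216 * t) % 256 = (m / 256) % 256 := by
    have h : m / 256 + 16777216 * t = m / 256 + 256 * (65536 * t) := by ring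
    rw [h, Int.add_mul_emod_self_left]
  have e3 : m / 256 / 256 = m / 65536 := by
    have := @Int.ediv_ediv_of_nonneg m 256 256 (by norm_num)
    norm_num at this
    exact this
  have e4 : (m / 256) % 256 = m / 256 - 256 * (m / 65536) := by
    rw [Int.emod_def, e3]
  rw [e1, e2, e4]
  omega

theorem pvByteCore16 (m t : Int) (h0 : 0 ≤ m) (h1 : m < 4294967296) :
    (((m + 4294967296 * t) / 65536) % 256).toNat = (m.toNat / 65536) % 256 := by
  have e1 : (m + 4294967296 * t) / 65536 = m / 65536 + 65536 * t := by
    have h : m + 4294967296 * t = m + (65536 * t) * 65536 := by ring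
    rw [h, Int.add_mul_ediv_right _ _ (by norm_num : (65536:Int) ≠ 0)]
  have e2 : (m / 65536 + 65536 * t) % 256 = (m / 65536) % 256 := by
    have h : m / 65536 + 65536 * t = m / 65536 + 256 * (256 * t) := by ring
    rw [h, Int.add_mul_emod_self_left]
  have e3 : m / 65536 / 256 = m / 16777216 := by
    have := @Int.ediv_ediv_of_nonneg m 65536 256 (by norm_num)
    norm_num at this
    exact this
  have e4 : (m / 65536) % 256 = m / 65536 - 256 * (m / 16777216) := by
    rw [Int.emod_def, e3]
  rw [e1, e2, e4]
  omega

theorem pvByteCore24 (m t : Int) (h0 : 0 ≤ m) (h1 : m < 4294967296) :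
    (((m + 4294967296 * t) / 16777216) % 256).toNat = (m.toNat / 16777216) % 256 := by
  have e1 : (m + 4294967296 * t) / 16777216 = m / 16777216 + 256 * t := by
    have h : m + 4294967296 * t = m + (256 * t) * 16777216 := by ring
    rw [h, Int.add_mul_ediv_right _ _ (by norm_num : (16777216:Int) ≠ 0)]
  have e2 : (m / 16777216 + 256 * t) % 256 = (m / 16777216) % 256 := by
    have h : m / 16777216 + 256 * t = m / 16777216 + 256 * (1 * t) := by ring
    rw [h, Int.add_mul_emod_self_left]
  have e3 : m / 16777216 / 256 = m / 4294967296 := by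
    have := @Int.ediv_ediv_of_nonneg m 16777216 256 (by norm_num)
    norm_num at this
    exact this
  have e4 : (m / 16777216) % 256 = m / 16777216 - 256 * (m / 4294967296) := by
    rw [Int.emod_def, e3]
  rw [e1, e2, e4]
  omega

theorem pvByte_eq0 (k : Int) : pvByte k 0 = ((k % 4294967296).toNat >>> 0) &&& 255 := by
  have hr : ((k % 4294967296).toNat >>> 0) &&& 255 = (k % 4294967296).toNat % 256 := by
    have h3 := Nat.and_two_pow_sub_one_eq_mod (k % 4294967296).toNat 8
    norm_num at h3
    simpa [Nat.shiftRight_zero] using h3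
  have hd : ∃ t : Int, k = k % 4294967296 + 4294967296 * t := ⟨k / 4294967296, by omega⟩
  obtain ⟨t, ht⟩ := hd
  have hm0 : 0 ≤ k % 4294967296 := Int.emod_nonneg _ (by norm_num)
  have hm1 : k % 4294967296 < 4294967296 := Int.emod_lt_of_pos _ (by norm_num)
  rw [pvByte, hr]
  have hsh : k >>> (0:Nat) = k := by norm_num
  rw [hsh]
  conv_lhs => rw [ht]
  exact pvByteCore0 _ t hm0 hm1

theorem pvByte_eq8 (k : Int) : pvByte k 8 = ((k % 4294967296).toNat >>> 8) &&& 255 := by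
  have hr : ((k % 4294967296).toNat >>> 8) &&& 255 = ((k % 4294967296).toNat / 256) % 256 := by
    have h2 := Nat.shiftRight_eq_div_pow (k % 4294967296).toNat 8
    have h3 := Nat.and_two_pow_sub_one_eq_mod ((k % 4294967296).toNat / 256) 8
    norm_num at h2 h3
    rw [h2, h3]
  have hsh : k >>> (8:Nat) = k / 256 := by
    have := Int.shiftRight_eq_div_pow k 8
    norm_num at this
    exact this
  have hd : ∃ t : Int, k = k % 4294967296 + 4294967296 * t := ⟨k / 4294967296, by omega⟩
  obtain ⟨t, ht⟩ := hd
  have hm0 : 0 ≤ k % 4294967296 := Int.emod_nonneg _ (by norm_num)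
  have hm1 : k % 4294967296 < 4294967296 := Int.emod_lt_of_pos _ (by norm_num)
  rw [pvByte, hr, hsh]
  conv_lhs => rw [ht]
  exact pvByteCore8 _ t hm0 hm1

theorem pvByte_eq16 (k : Int) : pvByte k 16 = ((k % 4294967296).toNat >>> 16) &&& 255 := by
  have hr : ((k % 4294967296).toNat >>> 16) &&& 255 = ((k % 4294967296).toNat / 65536) % 256 := by
    have h2 := Nat.shiftRight_eq_div_pow (k % 4294967296).toNat 16
    have h3 := Nat.and_two_pow_sub_one_eq_mod ((k % 4294967296).toNat / 65536) 8
    norm_num at h2 h3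
    rw [h2, h3]
  have hsh : k >>> (16:Nat) = k / 65536 := by
    have := Int.shiftRight_eq_div_pow k 16
    norm_num at this
    exact this
  have hd : ∃ t : Int, k = k % 4294967296 + 4294967296 * t := ⟨k / 4294967296, by omega⟩
  obtain ⟨t, ht⟩ := hd
  have hm0 : 0 ≤ k % 4294967296 := Int.emod_nonneg _ (by norm_num)
  have hm1 : k % 4294967296 < 4294967296 := Int.emod_lt_of_pos _ (by norm_num)
  rw [pvByte, hr, hsh]
  conv_lhs => rw [ht]
  exact pvByteCore16 _ t hm0 hm1

theorem pvByte_eq24 (k : Int) : pvByte k 24 = ((k % 4294967296).toNat >>> 24) &&& 255 := by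
  have hr : ((k % 4294967296).toNat >>> 24) &&& 255 = ((k % 4294967296).toNat / 16777216) % 256 := by
    have h2 := Nat.shiftRight_eq_div_pow (k % 4294967296).toNat 24
    have h3 := Nat.and_two_pow_sub_one_eq_mod ((k % 4294967296).toNat / 16777216) 8
    norm_num at h2 h3
    rw [h2, h3]
  have hsh : k >>> (24:Nat) = k / 16777216 := by
    have := Int.shiftRight_eq_div_pow k 24
    norm_num at this
    exact this
  have hd : ∃ t : Int, k = k % 4294967296 + 4294967296 * t := ⟨k / 4294967296, by omega⟩
  obtain ⟨t, ht⟩ := hd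
  have hm0 : 0 ≤ k % 4294967296 := Int.emod_nonneg _ (by norm_num)
  have hm1 : k % 4294967296 < 4294967296 := Int.emod_lt_of_pos _ (by norm_num)
  rw [pvByte, hr, hsh]
  conv_lhs => rw [ht]
  exact pvByteCore24 _ t hm0 hm1

-- ===== VERDICT (by name: the statement is the Claim_ definition above) =====
theorem rs_mds_encode_py_spec : Claim_equal_rs_mds_encode_py := by
  unfold Claim_equal_rs_mds_encode_py
  intro k0 k1 _
  unfold Spec_rs_mds_encode_py
  have hA : rs_mds_encode_py k0 k1 =
      ((pvARaw [pvByte k0 0, pvByte k0 8, pvByte k0 16, pvByte k0 24,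
                pvByte k1 0, pvByte k1 8, pvByte k1 16, pvByte k1 24] : Nat) : Int) := rfl
  have hB : rs_mds_encode_py_alt k0 k1 =
      ((pvR4 (pvR4 (k1 % 4294967296).toNat ^^^ (k0 % 4294967296).toNat) : Nat) : Int) := rfl
  rw [hA, hB]
  have h0 : (k0 % 4294967296).toNat < 2^32 := by
    have := Int.emod_lt_of_pos k0 (by norm_num : (0:Int) < 4294967296)
    have := Int.emod_nonneg k0 (by norm_num : (4294967296:Int) ≠ 0)
    omega
  have h1 : (k1 % 4294967296).toNat < 2^32 := by
    have := Int.emod_lt_of_pos k1 (by norm_num : (0:Int) < 4294967296)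
    have := Int.emod_nonneg k1 (by norm_num : (4294967296:Int) ≠ 0)
    omega
  rw [pvARaw_cols, pvByte_eq0 k0, pvByte_eq8 k0, pvByte_eq16 k0, pvByte_eq24 k0,
      pvByte_eq0 k1, pvByte_eq8 k1, pvByte_eq16 k1, pvByte_eq24 k1]
  exact_mod_cast congrArg (Nat.cast : Nat → Int) (pvNatMain _ _ h0 h1).symm
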